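-- pv_equiv track=rewrite | github.com/itsnowkim/algorithm-study | code/gimkuku/week7/60058.py | solution
-- ===== SOURCE A (Python) =====
-- def split(p):
--     cnt = 0
--     index =0
--     for index in range(len(p)):
--         if p[index] == ')':
--             cnt = cnt +1
--         else :
--             cnt = cnt -1
--         if cnt == 0:
--             break
--     return p[:index+1],p[index+1:]
--
-- def check(u):
--     stack = []
--     for p in u:
--         if p == '(':
--             stack.append(p)
--         else:
--             # 스택이 비어있으면
--             if stack == []:
--                 return False
--             stack.pop()
--     return True
--
-- def solution(p):
--     if len(p) == 0:
--         return ""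
--
--     # u, v 로 분리
--     u,v = split(p)
--
--     if (check(u)):
--         return u + solution(v)
--     else :
--         ans = '('
--         ans = ans + solution(v)
--         ans = ans + ')'
--         # 앞뒤 자르고 괄호 바꾸기
--         u = u[1:len(u)-1]
--         ans = ans + u[:: -1]
--
--     return ans
-- ===== SOURCE B (Python) =====
-- def solution(p):
--     # Single fused scan per segment over index pointers; output built in a list, no slicing of v.
--     s = p
--     out = []
--
--     def go(i):
--         n = len(s)
--         if i >= n:
--             return
--         bal = 0
--         depth = 0
--         ok = True
--         j = i
--         for j in range(i, n):
--             c = s[j]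
--             if c == ')':
--                 bal += 1
--             else:
--                 bal -= 1
--             if c == '(':
--                 depth += 1
--             elif depth == 0:
--                 ok = False
--             else:
--                 depth -= 1
--             if bal == 0:
--                 break
--         # u = s[i:j+1], v = s[j+1:]
--         if ok:
--             out.append(s[i:j + 1])
--             go(j + 1)
--         else:
--             out.append('(')
--             go(j + 1)
--             out.append(')')
--             out.extend(s[k] for k in range(j - 1, i, -1))
--
--     go(0)
--     return ''.join(out)
-- ===== Notes on version B (the rewrite author's own statement) =====
-- stated objective: alternative
-- what changed: A recursively slices p into u/v with separate split and check passes and rebuilds the answer by string concatenation; B does one fused scan per segment that computes the split point and the balance-check together over index pointers, appending pieces to a single output list joined once at the end.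
import Mathlib
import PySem

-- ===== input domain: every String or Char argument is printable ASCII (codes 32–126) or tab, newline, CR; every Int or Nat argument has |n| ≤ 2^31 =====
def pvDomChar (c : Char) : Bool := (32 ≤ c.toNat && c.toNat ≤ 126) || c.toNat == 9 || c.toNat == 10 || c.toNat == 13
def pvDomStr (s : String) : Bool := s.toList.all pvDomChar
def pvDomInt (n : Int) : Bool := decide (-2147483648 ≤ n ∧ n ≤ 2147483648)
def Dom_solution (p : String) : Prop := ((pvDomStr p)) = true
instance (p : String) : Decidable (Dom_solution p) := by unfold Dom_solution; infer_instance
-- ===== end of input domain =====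

-- B replaces A's slice-and-concatenate recursion with a single fused split/check scan
-- per segment and a flat output accumulator (objective: alternative).

-- ===== PORT A =====
-- split(p): for-loop with break, returning the number of consumed chars (index+1; 0 for "")
def splitLoopA (l : List Char) (cnt : Int) : Nat :=
  match l with
  | [] => 0
  | c :: rest =>
      let cnt' := if c = ')' then cnt + 1 else cnt - 1
      if cnt' = 0 then 1
      else
        match rest with
        | [] => 1                       -- loop ends without break
        | _ :: _ => splitLoopA rest cnt' + 1

-- termination helper for solA (the split consumes at least one char of a nonempty input)
theorem splitLoopA_pos (l : List Char) (cnt : Int) (h : l ≠ []) : 1 ≤ splitLoopA l cnt := by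
  cases l with
  | nil => exact absurd rfl h
  | cons c rest =>
      cases rest <;> simp only [splitLoopA] <;> split_ifs <;> omega

-- check(u): stack of '(' chars, early return False on pop of empty stack
def checkA (u : List Char) (stack : List Char) : Bool :=
  match u with
  | [] => true
  | c :: rest =>
      if c = '(' then checkA rest (stack ++ ['('])   -- stack.append('(')
      else if stack = [] then false
      else checkA rest stack.dropLast                -- stack.pop()

-- solution(p), recursively on the character list; p[:i+1]/p[i+1:] are take/drop (exact
-- for these nonnegative in-range indices), u[1:len(u)-1] is (drop 1).dropLast, u[::-1] reverse
def solA (l : List Char) : List Char :=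
  if h : l = [] then []
  else
    let k := splitLoopA l 0
    let u := l.take k
    let v := l.drop k
    if checkA u [] then u ++ solA v
    else ['('] ++ solA v ++ [')'] ++ ((u.drop 1).dropLast).reverse
termination_by l.length
decreasing_by
  all_goals
    have h1 := splitLoopA_pos l 0 h
    have h2 : 0 < l.length := List.length_pos_iff.mpr h
    simp only [List.length_drop]
    omega

def solution (p : String) : String := String.mk (solA p.toList)

-- ===== PORT B =====
-- the fused for-loop of go: returns (number of consumed chars = j-i+1, ok flag);
-- depthStep/okStep are the loop body's if/elif/else on (depth, ok)
def depthStep (c : Char) (depth : Nat) : Nat :=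
  if c = '(' then depth + 1 else if depth = 0 then depth else depth - 1

def okStep (c : Char) (depth : Nat) (ok : Bool) : Bool :=
  if c = '(' then ok else if depth = 0 then false else ok

def scanB (l : List Char) (bal : Int) (depth : Nat) (ok : Bool) : Nat × Bool :=
  match l with
  | [] => (0, ok)
  | c :: rest =>
      let bal' := if c = ')' then bal + 1 else bal - 1
      let ok' := okStep c depth ok
      if bal' = 0 then (1, ok')
      else
        match rest with
        | [] => (1, ok')
        | _ :: _ =>
            let r := scanB rest bal' (depthStep c depth) ok'
            (r.1 + 1, r.2)

-- one-step unfolding of scanB on a cons (controls rewriting in the proofs below)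
theorem scanB_cons (c : Char) (rest : List Char) (bal : Int) (depth : Nat) (ok : Bool) :
    scanB (c :: rest) bal depth ok =
      (if (if c = ')' then bal + 1 else bal - 1) = 0 then (1, okStep c depth ok)
       else
         match rest with
         | [] => (1, okStep c depth ok)
         | _ :: _ =>
             ((scanB rest (if c = ')' then bal + 1 else bal - 1) (depthStep c depth)
                 (okStep c depth ok)).1 + 1,
              (scanB rest (if c = ')' then bal + 1 else bal - 1) (depthStep c depth)
                 (okStep c depth ok)).2)) := rfl

-- termination helper for goB
theorem scanB_pos (l : List Char) (bal : Int) (depth : Nat) (ok : Bool) (h : l ≠ []) :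
    1 ≤ (scanB l bal depth ok).1 := by
  cases l with
  | nil => exact absurd rfl h
  | cons c rest =>
      rw [scanB_cons]
      cases rest <;> split_ifs <;> simp <;> omega

-- go(i): the suffix s[i:] is the list argument, out is the accumulator
def goB (l : List Char) (out : List Char) : List Char :=
  if h : l = [] then out
  else
    let r := scanB l 0 0 true
    let k := r.1
    if r.2 then goB (l.drop k) (out ++ l.take k)
    else
      let out2 := goB (l.drop k) (out ++ ['('])
      (out2 ++ [')']) ++ (((l.take k).drop 1).dropLast).reverse
termination_by l.length
decreasing_by
  all_goals
    have h1 := scanB_pos l 0 0 true h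
    have h2 : 0 < l.length := List.length_pos_iff.mpr h
    simp only [List.length_drop]
    omega

def solution_alt (p : String) : String := String.mk (goB p.toList [])

-- ===== PRECONDITION & SPEC =====
def Spec_solution (p : String) (out : String) : Prop := out = solution_alt p
instance (p : String) (out : String) : Decidable (Spec_solution p out) := by unfold Spec_solution; infer_instance

-- ===== CLAIM (what is proved, stated in full; the proofs are below) =====
def Claim_equal_solution : Prop := ∀ (p : String), Dom_solution p → Spec_solution p (solution p)

-- ===== LEMMAS AND PROOFS =====

-- one-step unfolding of splitLoopA on a cons
theorem splitLoopA_cons (c : Char) (rest : List Char) (cnt : Int) :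
    splitLoopA (c :: rest) cnt =
      (if (if c = ')' then cnt + 1 else cnt - 1) = 0 then 1
       else
         match rest with
         | [] => 1
         | _ :: _ => splitLoopA rest (if c = ')' then cnt + 1 else cnt - 1) + 1) := rfl

-- the consumed-count component of scanB is splitLoopA, independently of depth/ok
theorem scanB_fst (l : List Char) (bal : Int) (depth : Nat) (ok : Bool) :
    (scanB l bal depth ok).1 = splitLoopA l bal := by
  induction l generalizing bal depth ok with
  | nil => rfl
  | cons c rest ih =>
      rw [scanB_cons, splitLoopA_cons]
      cases rest <;> split_ifs <;> simp [ih]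

-- once the ok flag is false it stays false
theorem scanB_false (l : List Char) (bal : Int) (depth : Nat) :
    (scanB l bal depth false).2 = false := by
  induction l generalizing bal depth with
  | nil => rfl
  | cons c rest ih =>
      have hok : okStep c depth false = false := by
        unfold okStep; split_ifs <;> rfl
      rw [scanB_cons, hok]
      cases rest <;> split_ifs <;> simp [ih]

-- the fused scan computes both A's split length and A's check of the split-off prefix
theorem scanB_eq (l : List Char) (bal : Int) (stack : List Char) :
    scanB l bal stack.length true =
      (splitLoopA l bal, checkA (l.take (splitLoopA l bal)) stack) := by
  induction l generalizing bal stack with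
  | nil => rfl
  | cons c rest ih =>
      rw [scanB_cons, splitLoopA_cons]
      by_cases hc : c = '('
      · -- push: depth+1, ok unchanged; checkA steps to stack ++ ['(']
        subst hc
        have hd : depthStep '(' stack.length = (stack ++ ['(']).length := by
          simp [depthStep]
        have ho : okStep '(' stack.length true = true := by simp [okStep]
        rw [hd, ho]
        simp only [if_neg (by decide : ¬('(' : Char) = ')')]
        by_cases hz : bal - 1 = 0
        · simp [hz, checkA]
        · cases rest with
          | nil => simp [hz, checkA]
          | cons c2 r2 =>
              rw [ih (bal - 1) (stack ++ ['('])]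
              simp [hz, checkA]
      · by_cases hs : stack = []
        · -- pop of empty stack: ok goes (and stays) false; checkA returns false
          subst hs
          have ho : okStep c 0 true = false := by simp [okStep, hc]
          simp only [List.length_nil, ho]
          by_cases hz : (if c = ')' then bal + 1 else bal - 1) = 0
          · simp [hz, checkA, hc]
          · cases rest with
            | nil => simp [hz, checkA, hc]
            | cons c2 r2 =>
                simp [hz, checkA, hc, scanB_fst, scanB_false]
        · -- pop: depth-1, ok unchanged; checkA steps to stack.dropLast
          have hs0 : stack.length ≠ 0 := by simpa [List.length_eq_zero_iff] using hs
          have hd : depthStep c stack.length = stack.dropLast.length := by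
            simp [depthStep, hc, hs0, List.length_dropLast]
          have ho : okStep c stack.length true = true := by simp [okStep, hc, hs0]
          rw [hd, ho]
          by_cases hz : (if c = ')' then bal + 1 else bal - 1) = 0
          · simp [hz, checkA, hc, hs]
          · cases rest with
            | nil => simp [hz, checkA, hc, hs]
            | cons c2 r2 =>
                rw [ih (if c = ')' then bal + 1 else bal - 1) stack.dropLast]
                simp [hz, checkA, hc, hs]

-- goB with accumulator out computes out ++ solA
theorem goB_eq (n : Nat) (l : List Char) (out : List Char) (hn : l.length ≤ n) :
    goB l out = out ++ solA l := by
  induction n generalizing l out with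
  | zero =>
      have : l = [] := List.eq_nil_of_length_eq_zero (by omega)
      subst this; simp [goB, solA]
  | succ m ih =>
      by_cases h : l = []
      · subst h; simp [goB, solA]
      · have hscan := scanB_eq l 0 ([] : List Char)
        simp only [List.length_nil] at hscan
        have h1 := splitLoopA_pos l 0 h
        have h2 : 0 < l.length := List.length_pos_iff.mpr h
        have hlt : (l.drop (splitLoopA l 0)).length ≤ m := by
          simp only [List.length_drop]; omega
        rw [goB, solA]
        simp only [h, dite_false, hscan]
        by_cases hck : checkA (l.take (splitLoopA l 0)) [] = true
        · simp only [hck, if_true, ih _ _ hlt]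
          simp [List.append_assoc]
        · simp only [hck, ih _ _ hlt]
          simp [List.append_assoc]

-- ===== VERDICT (by name: the statement is the Claim_ definition above) =====
theorem solution_spec : Claim_equal_solution := by
  intro p _
  unfold Spec_solution solution solution_alt
  rw [goB_eq p.toList.length p.toList [] le_rfl]
  simp
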